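-- pv_equiv track=rewrite | github.com/PaulSpringer23/MarkCode | ChaptersAndBookmarks.py | group_bookmarks
-- ===== SOURCE A (Python) =====
-- def group_bookmarks(bookmarks, chapters):
--     bookmark_index = len(bookmarks) - 1
--     chapters_index = len(chapters) - 1
--
--     chapter_buckets = {}
--
--     while bookmark_index >= 0:
--         # We know that bookmark[0] will never be earlier than chapters[0],
--         # so we don't need to do any checking for that here.
--         while bookmarks[bookmark_index] < chapters[chapters_index]:
--             chapters_index -= 1
--
--         if chapters[chapters_index] not in chapter_buckets:
--             chapter_buckets[chapters[chapters_index]] = []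
--
--         chapter_buckets[chapters[chapters_index]].append(bookmarks[bookmark_index])
--         bookmark_index -= 1
--
--     return chapter_buckets
-- ===== SOURCE B (Python) =====
-- def group_bookmarks(bookmarks, chapters):
--     buckets = {}
--     k = len(bookmarks) - 1
--     for c in reversed(chapters):
--         while k >= 0 and bookmarks[k] >= c:
--             buckets.setdefault(c, []).append(bookmarks[k])
--             k -= 1
--     return buckets
-- ===== Notes on version B (the rewrite author's own statement) =====
-- stated objective: simpler
-- what changed: Interchanged the loops: instead of A's per-bookmark outer loop driving a shared descending chapter index with an inner while over negative indices, B makes one backward for-loop over chapters and at each chapter consumes every remaining bookmark at or after it, bucketing via setdefault; Pre_ excludes inputs with a bookmark earlier than every chapter, on which A raises IndexError.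
import Mathlib
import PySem

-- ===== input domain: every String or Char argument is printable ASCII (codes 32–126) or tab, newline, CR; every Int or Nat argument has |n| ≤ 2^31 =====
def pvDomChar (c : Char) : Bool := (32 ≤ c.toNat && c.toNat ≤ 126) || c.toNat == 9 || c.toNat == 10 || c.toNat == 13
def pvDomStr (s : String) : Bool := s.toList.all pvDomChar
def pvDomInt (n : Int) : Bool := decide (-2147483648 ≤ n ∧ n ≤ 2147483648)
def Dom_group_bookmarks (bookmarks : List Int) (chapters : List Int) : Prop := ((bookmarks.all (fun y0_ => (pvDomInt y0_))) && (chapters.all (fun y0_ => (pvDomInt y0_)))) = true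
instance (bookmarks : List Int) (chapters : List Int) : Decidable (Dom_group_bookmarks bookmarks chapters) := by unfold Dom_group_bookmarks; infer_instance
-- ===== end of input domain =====

-- B interchanges the loops: one backward for-loop over chapters, each chapter
-- consuming every remaining bookmark at or after it (objective: simpler).
-- Pre_ excludes the inputs on which Python A raises IndexError.

-- ===== PORT A =====
-- inner 'while bookmarks[bookmark_index] < chapters[chapters_index]: chapters_index -= 1'
-- (Python negative-index wraparound via pyGet?; pyGet? = none is Python's IndexError,
-- there the walk stops and the outer lookup below also sees none and the port returns
-- the buckets built so far — these inputs are excluded by Pre_group_bookmarks)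
def groupA_inner (chapters : List Int) (b : Int) (ci : Int) : Int :=
  match h : PySem.List.pyGet? chapters ci with
  | some v => if b < v then groupA_inner chapters b (ci - 1) else ci
  | none => ci
termination_by (ci + chapters.length + 1).toNat
decreasing_by
  have : ¬ (PySem.List.pyGet? chapters ci = none) := by simp [h]
  rw [PySem.List.pyGet?_eq_none_iff] at this
  have := not_not.mp (by simpa using this)
  rcases this with ⟨h1, -⟩
  omega

-- outer loop; n = bookmark_index + 1 (number of bookmarks still to process)
def groupA_go (bookmarks chapters : List Int) : Nat → Int → PySem.Dict Int (List Int) → PySem.Dict Int (List Int)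
  | 0, _, d => d
  | n + 1, ci, d =>
    match PySem.List.pyGet? bookmarks (n : Int) with
    | none => d
    | some b =>
      let ci' := groupA_inner chapters b ci
      match PySem.List.pyGet? chapters ci' with
      | none => d
      | some c =>
        let d1 := if d.contains c then d else d.insert c ([] : List Int)
        groupA_go bookmarks chapters n ci' (d1.modify c [] (fun l => l ++ [b]))

def group_bookmarks (bookmarks : List Int) (chapters : List Int) : List (Int × List Int) :=
  (groupA_go bookmarks chapters bookmarks.length ((chapters.length : Int) - 1) PySem.Dict.empty).items

-- ===== PORT B =====
-- Source B's inner 'while k >= 0 and bookmarks[k] >= c: buckets.setdefault(c, []).append(bookmarks[k]); k -= 1'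
-- (state: k + 1 = number of bookmarks still unconsumed, and the buckets so far)
def groupB_inner (bookmarks : List Int) (c : Int) : Nat → PySem.Dict Int (List Int) → Nat × PySem.Dict Int (List Int)
  | 0, d => (0, d)
  | k + 1, d =>
    match PySem.List.pyGet? bookmarks (k : Int) with
    | none => (k + 1, d)
    | some b =>
      if c ≤ b then
        groupB_inner bookmarks c k ((d.setdefault c []).modify c [] (fun l => l ++ [b]))
      else (k + 1, d)

-- Source B: 'for c in reversed(chapters): …'
def group_bookmarks_alt (bookmarks : List Int) (chapters : List Int) : List (Int × List Int) :=
  ((chapters.reverse).foldl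
      (fun st c => groupB_inner bookmarks c st.1 st.2)
      (bookmarks.length, PySem.Dict.empty)).2.items

-- ===== PRECONDITION & SPEC =====
-- exactly the inputs on which Python A returns normally: every bookmark has some
-- chapter at or before it (otherwise A's descending chapter index underflows past
-- -len(chapters) and A raises IndexError; B returns the buckets of the fitting bookmarks)
def Pre_group_bookmarks (bookmarks : List Int) (chapters : List Int) : Prop :=
  ∀ b ∈ bookmarks, ∃ c ∈ chapters, c ≤ b
instance (bookmarks : List Int) (chapters : List Int) : Decidable (Pre_group_bookmarks bookmarks chapters) := by unfold Pre_group_bookmarks; infer_instance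

def pvWitness_group_bookmarks : List Int × List Int := ([5, 6, 10], [1, 6, 8])

def Spec_group_bookmarks (bookmarks : List Int) (chapters : List Int) (out : List (Int × List Int)) : Prop := out = group_bookmarks_alt bookmarks chapters
instance (bookmarks : List Int) (chapters : List Int) (out : List (Int × List Int)) : Decidable (Spec_group_bookmarks bookmarks chapters out) := by unfold Spec_group_bookmarks; infer_instance

-- ===== CLAIM (what is proved, stated in full; the proofs are below) =====
def Claim_equal_group_bookmarks : Prop := ∀ (bookmarks : List Int) (chapters : List Int), Dom_group_bookmarks bookmarks chapters → Pre_group_bookmarks bookmarks chapters → Spec_group_bookmarks bookmarks chapters (group_bookmarks bookmarks chapters)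

-- ===== LEMMAS AND PROOFS =====

-- position t of the doubled chapter list, read through Python indexing: t ∈ [0, len)
-- is the wrap chapters[t - len], t ∈ [len, 2len) is the plain chapters[t - len]
theorem E_get (chapters : List Int) (t : Nat) (ht : t < (chapters ++ chapters).length) :
    PySem.List.pyGet? chapters ((t : Int) - chapters.length) = some (chapters ++ chapters)[t] := by
  rw [List.length_append] at ht
  by_cases h : t < chapters.length
  · have h1 : 0 < chapters.length - t := by omega
    have h2 : chapters.length - t ≤ chapters.length := by omega
    have : ((t : Int) - chapters.length) = -(((chapters.length - t : Nat) : Int)) := by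
      push_cast [Nat.cast_sub (by omega : t ≤ chapters.length)]; ring
    rw [this, PySem.List.pyGet?_neg_natCast chapters (chapters.length - t) h1 h2]
    have hidx : chapters.length - (chapters.length - t) = t := by omega
    rw [hidx, List.getElem?_eq_getElem h]
    congr 1
    exact (List.getElem_append_left h).symm
  · have h' : t - chapters.length < chapters.length := by omega
    have : ((t : Int) - chapters.length) = ((t - chapters.length : Nat) : Int) := by
      push_cast [Nat.cast_sub (by omega : chapters.length ≤ t)]; ring
    rw [this, PySem.List.pyGet?_natCast, List.getElem?_eq_getElem h']
    congr 1
    exact (List.getElem_append_right (by omega)).symm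

-- with no bookmarks left, a sweep is inert
theorem sweep_zero (bookmarks : List Int) (cs : List Int) (d : PySem.Dict Int (List Int)) :
    cs.foldl (fun st c => groupB_inner bookmarks c st.1 st.2) (0, d) = (0, d) := by
  induction cs generalizing d with
  | nil => rfl
  | cons c cs ih => simpa [groupB_inner] using ih d

-- A's dict update ('if c not in d: d[c] = []' then append) is B's setdefault-append
theorem dict_step_eq (d : PySem.Dict Int (List Int)) (c b : Int) :
    ((if d.contains c then d else d.insert c ([] : List Int)).modify c [] (fun l => l ++ [b]))
      = ((d.setdefault c []).modify c [] (fun l => l ++ [b])) := by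
  cases hcont : d.contains c with
  | true => simp [PySem.Dict.setdefault_of_contains _ _ hcont]
  | false => simp [PySem.Dict.setdefault_of_not_contains _ _ hcont]

-- the merge: the sweep over the reversed n-prefix of chapters+chapters with k bookmarks
-- left equals A's outer loop started at pointer n - len - 1
theorem merge_eq (bookmarks chapters : List Int) :
    ∀ (k : Nat), k ≤ bookmarks.length →
    ∀ (n : Nat), n ≤ (chapters ++ chapters).length →
    ∀ (d : PySem.Dict Int (List Int)),
      ((((chapters ++ chapters).take n).reverse).foldl
          (fun st c => groupB_inner bookmarks c st.1 st.2) (k, d)).2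
        = groupA_go bookmarks chapters k ((n : Int) - chapters.length - 1) d := by
  intro k
  induction k with
  | zero =>
    intro _ n _ d
    rw [sweep_zero, groupA_go]
  | succ k ihk =>
    intro hk n
    induction n with
    | zero =>
      intro _ d
      have hb : PySem.List.pyGet? bookmarks (k : Int) = some bookmarks[k] := by
        rw [PySem.List.pyGet?_natCast]; exact List.getElem?_eq_getElem (by omega)
      have hciN : PySem.List.pyGet? chapters ((0 : Int) - chapters.length - 1) = none := by
        rw [PySem.List.pyGet?_eq_none_iff]
        intro ⟨h1, h2⟩; omega
      have hinner : groupA_inner chapters bookmarks[k] ((0 : Int) - chapters.length - 1)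
          = (0 : Int) - chapters.length - 1 := by
        rw [groupA_inner, hciN]
      rw [groupA_go, hb]
      simp only [Nat.cast_zero, hinner, hciN, List.take_zero, List.reverse_nil, List.foldl_nil]
    | succ n ihn =>
      intro hn d
      have hlt : n < (chapters ++ chapters).length := by omega
      set c := (chapters ++ chapters)[n] with hcdef
      have hE : PySem.List.pyGet? chapters ((n : Int) - chapters.length) = some c :=
        E_get chapters n hlt
      have hb : PySem.List.pyGet? bookmarks (k : Int) = some bookmarks[k] := by
        rw [PySem.List.pyGet?_natCast]; exact List.getElem?_eq_getElem (by omega)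
      have hcast : ((n + 1 : Nat) : Int) - chapters.length - 1 = (n : Int) - chapters.length := by
        push_cast; ring
      have htake : ((chapters ++ chapters).take (n + 1)).reverse
          = c :: ((chapters ++ chapters).take n).reverse := by
        rw [← List.take_concat_get hlt, List.concat_eq_append, List.reverse_append,
          List.reverse_singleton, List.singleton_append]
      rw [htake, List.foldl_cons, hcast]
      by_cases hbc : bookmarks[k] < c
      · -- skip: this chapter position is too late for every remaining bookmark
        have hBskip : groupB_inner bookmarks c (k + 1) d = (k + 1, d) := by
          rw [groupB_inner, hb]
          simp only [if_neg (show ¬ c ≤ bookmarks[k] by omega)]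
        have hAstep : groupA_inner chapters bookmarks[k] ((n : Int) - chapters.length)
            = groupA_inner chapters bookmarks[k] ((n : Int) - chapters.length - 1) := by
          rw [groupA_inner, hE]
          simp only [if_pos hbc]
        rw [hBskip, ihn (by omega) d, groupA_go, groupA_go, hb]
        simp only [hAstep]
      · -- consume: bookmark k lands in the bucket of this chapter position
        have hstop : groupA_inner chapters bookmarks[k] ((n : Int) - chapters.length)
            = (n : Int) - chapters.length := by
          rw [groupA_inner, hE]
          simp only [if_neg hbc]
        have hBcons : groupB_inner bookmarks c (k + 1) d
            = groupB_inner bookmarks c k ((d.setdefault c []).modify c [] (fun l => l ++ [bookmarks[k]])) := by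
          rw [groupB_inner, hb]
          simp only [if_pos (show c ≤ bookmarks[k] by omega)]
        rw [hBcons, groupA_go, hb]
        simp only [hstop, hE, dict_step_eq]
        have := ihk (by omega) (n + 1) (by omega)
          ((d.setdefault c []).modify c [] (fun l => l ++ [bookmarks[k]]))
        rw [htake, List.foldl_cons, hcast] at this
        exact this

-- the inner while never increases the bookmark counter
theorem inner_fst_le (bookmarks : List Int) (c : Int) :
    ∀ (k : Nat) (d : PySem.Dict Int (List Int)), (groupB_inner bookmarks c k d).1 ≤ k := by
  intro k
  induction k with
  | zero => intro d; simp [groupB_inner]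
  | succ k ih =>
    intro d
    rw [groupB_inner]
    cases PySem.List.pyGet? bookmarks (k : Int) with
    | none => simp
    | some b =>
      by_cases h : c ≤ b
      · simp only [if_pos h]; exact le_trans (ih _) (by omega)
      · simp [if_neg h]

-- nor does a whole sweep
theorem sweep_fst_le (bookmarks : List Int) (cs : List Int) :
    ∀ (k : Nat) (d : PySem.Dict Int (List Int)),
      (cs.foldl (fun st c => groupB_inner bookmarks c st.1 st.2) (k, d)).1 ≤ k := by
  induction cs with
  | nil => intro k d; simp
  | cons c cs ih =>
    intro k d
    rw [List.foldl_cons]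
    exact le_trans (ih _ _) (inner_fst_le bookmarks c k d)

-- after the inner while stops, the bookmark now on top is below the chapter
theorem inner_blocked (bookmarks : List Int) (c : Int) :
    ∀ (k : Nat) (d : PySem.Dict Int (List Int)), k ≤ bookmarks.length →
      ∀ (j : Nat) (hj : j < bookmarks.length),
        (groupB_inner bookmarks c k d).1 = j + 1 → bookmarks[j] < c := by
  intro k
  induction k with
  | zero => intro d _ j _ h; simp [groupB_inner] at h
  | succ k ih =>
    intro d hk j hj h
    rw [groupB_inner] at h
    have hb : PySem.List.pyGet? bookmarks (k : Int) = some bookmarks[k] := by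
      rw [PySem.List.pyGet?_natCast]; exact List.getElem?_eq_getElem (by omega)
    rw [hb] at h
    by_cases hcb : c ≤ bookmarks[k]
    · simp only [if_pos hcb] at h
      exact ih _ (by omega) j hj h
    · simp only [if_neg hcb] at h
      have : j = k := by omega
      subst this; omega

-- the inner while consumed the old top only if the chapter was at or before it
theorem inner_consume (bookmarks : List Int) (c : Int) (k : Nat) (d : PySem.Dict Int (List Int))
    (hk : k < bookmarks.length) (h : (groupB_inner bookmarks c (k + 1) d).1 ≤ k) :
    c ≤ bookmarks[k] := by
  by_contra hcb
  rw [groupB_inner] at h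
  have hb : PySem.List.pyGet? bookmarks (k : Int) = some bookmarks[k] := by
    rw [PySem.List.pyGet?_natCast]; exact List.getElem?_eq_getElem hk
  rw [hb] at h
  simp only [if_neg hcb] at h
  omega

-- once the top bookmark is below b, every later sweep step keeps it below b
theorem sweep_preserve (bookmarks : List Int) (b : Int) :
    ∀ (cs : List Int) (k : Nat) (d : PySem.Dict Int (List Int)), k ≤ bookmarks.length →
      (∀ (j : Nat) (hj : j < bookmarks.length), k = j + 1 → bookmarks[j] < b) →
      ∀ (j : Nat) (hj : j < bookmarks.length),
        (cs.foldl (fun st c => groupB_inner bookmarks c st.1 st.2) (k, d)).1 = j + 1 →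
        bookmarks[j] < b := by
  intro cs
  induction cs with
  | nil => intro k d _ hblk j hj h; exact hblk j hj (by simpa using h)
  | cons c cs ih =>
    intro k d hk hblk j hj h
    rw [List.foldl_cons] at h
    set st2 := groupB_inner bookmarks c k d with hst2
    have hle : st2.1 ≤ k := inner_fst_le bookmarks c k d
    rcases lt_or_eq_of_le hle with hlt | heq
    · -- a consumption happened: new top is below c, and c ≤ old top < b
      obtain ⟨m, rfl⟩ : ∃ m, k = m + 1 := ⟨k - 1, by omega⟩
      have hmb : bookmarks[m] < b := hblk m (by omega) rfl
      have hcm : c ≤ bookmarks[m] :=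
        inner_consume bookmarks c m d (by omega) (by rw [← hst2]; omega)
      refine ih st2.1 st2.2 (by omega) ?_ j hj (by simpa using h)
      intro j' hj' hj1
      have hjc : bookmarks[j'] < c :=
        inner_blocked bookmarks c (m + 1) d hk j' hj' (by rw [← hst2]; exact hj1)
      omega
    · -- nothing consumed: the old top (if any) is unchanged
      refine ih st2.1 st2.2 (by omega) ?_ j hj (by simpa using h)
      intro j' hj' hj1
      exact hblk j' hj' (by omega)

-- under Pre_, the single backward sweep consumes every bookmark
theorem sweep_consumes_all (bookmarks chapters : List Int)
    (hpre : ∀ b ∈ bookmarks, ∃ c ∈ chapters, c ≤ b) :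
    ((chapters.reverse).foldl (fun st c => groupB_inner bookmarks c st.1 st.2)
        (bookmarks.length, PySem.Dict.empty)).1 = 0 := by
  by_contra hne
  set kf := ((chapters.reverse).foldl (fun st c => groupB_inner bookmarks c st.1 st.2)
      (bookmarks.length, PySem.Dict.empty)).1 with hkf
  have hkfle : kf ≤ bookmarks.length := sweep_fst_le bookmarks chapters.reverse _ _
  obtain ⟨j, hjdef⟩ : ∃ j, kf = j + 1 := ⟨kf - 1, by omega⟩
  have hj : j < bookmarks.length := by omega
  obtain ⟨c, hc, hcb⟩ := hpre bookmarks[j] (List.getElem_mem hj)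
  have hcrev : c ∈ chapters.reverse := List.mem_reverse.mpr hc
  obtain ⟨s, t, hst⟩ := List.append_of_mem hcrev
  have hsplit : chapters.reverse.foldl (fun st c => groupB_inner bookmarks c st.1 st.2)
      (bookmarks.length, PySem.Dict.empty)
      = t.foldl (fun st c => groupB_inner bookmarks c st.1 st.2)
          (groupB_inner bookmarks c
            (s.foldl (fun st c => groupB_inner bookmarks c st.1 st.2)
              (bookmarks.length, PySem.Dict.empty)).1
            (s.foldl (fun st c => groupB_inner bookmarks c st.1 st.2)
              (bookmarks.length, PySem.Dict.empty)).2) := by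
    rw [hst, List.foldl_append, List.foldl_cons]
  set st1 := s.foldl (fun st c => groupB_inner bookmarks c st.1 st.2)
      (bookmarks.length, PySem.Dict.empty) with hst1
  have hk1 : st1.1 ≤ bookmarks.length := sweep_fst_le bookmarks s _ _
  set st2 := groupB_inner bookmarks c st1.1 st1.2 with hst2
  have hk2 : st2.1 ≤ bookmarks.length := le_trans (inner_fst_le bookmarks c st1.1 st1.2) hk1
  have hblk : ∀ (j' : Nat) (hj' : j' < bookmarks.length), st2.1 = j' + 1 → bookmarks[j'] < c :=
    fun j' hj' h => inner_blocked bookmarks c st1.1 st1.2 hk1 j' hj' h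
  have hfinal : bookmarks[j] < bookmarks[j] := by
    refine sweep_preserve bookmarks bookmarks[j] t st2.1 st2.2 hk2 ?_ j hj ?_
    · intro j' hj' h
      exact lt_of_lt_of_le (hblk j' hj' h) hcb
    · have : (t.foldl (fun st c => groupB_inner bookmarks c st.1 st.2) (st2.1, st2.2)).1 = kf := by
        rw [hkf, hsplit]
      rw [this, hjdef]
  omega

-- ===== VERDICT (by name: the statements are the Claim_ definitions above) =====
theorem group_bookmarks_spec : Claim_equal_group_bookmarks := by
  unfold Claim_equal_group_bookmarks
  intro bookmarks chapters _ hpre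
  unfold Spec_group_bookmarks
  have h := merge_eq bookmarks chapters bookmarks.length (le_refl _)
    ((chapters ++ chapters).length) (le_refl _) PySem.Dict.empty
  rw [List.take_length] at h
  have hcast : (((chapters ++ chapters).length : Nat) : Int) - chapters.length - 1
      = (chapters.length : Int) - 1 := by
    rw [List.length_append]; push_cast; ring
  rw [hcast] at h
  unfold group_bookmarks group_bookmarks_alt
  rw [← h, List.reverse_append, List.foldl_append]
  set st1 := chapters.reverse.foldl (fun st c => groupB_inner bookmarks c st.1 st.2)
      (bookmarks.length, PySem.Dict.empty) with hst1
  have h0 : st1.1 = 0 := sweep_consumes_all bookmarks chapters hpre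
  have hpair : st1 = (0, st1.2) := by
    rw [← h0]
  rw [hpair, sweep_zero]
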